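-- pv_equiv track=rewrite | github.com/guicoliveira/euler | exercises/ex51.py | generate_intermediate_values
-- ===== SOURCE A (Python) =====
-- def generate_intermediate_values(value, n_digits, digits_to_replace, starting_point, level):
-- 	if level == digits_to_replace:
-- 		return [list(str(value))]
-- 	possibilities = []
-- 	for i in range(starting_point, (n_digits - digits_to_replace + level + 1)):
-- 		aux_possibilities = generate_intermediate_values(value, n_digits, digits_to_replace, i + 1, level + 1)
-- 		for poss in aux_possibilities:
-- 			poss[i] = "*"
-- 		possibilities = possibilities + aux_possibilities
-- 	return possibilities
-- ===== SOURCE B (Python) =====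
-- def generate_intermediate_values(value, n_digits, digits_to_replace, starting_point, level):
--     k = digits_to_replace - level
--     digits = list(str(value))
--     if k == 0:
--         return [digits]
--     if n_digits - starting_point < k:
--         return []
--     # dynamic programming over positions, processed from last to first:
--     # table[j] = all sorted j-element position combinations from the processed
--     # positions, in lexicographic order
--     table = [[[]]] + [[] for _ in range(k)]
--     for p in range(n_digits - 1, starting_point - 1, -1):
--         table = [table[0]] + [[[p] + c for c in prev] + cur
--                               for prev, cur in zip(table, table[1:])]
--     result = []
--     for combo in table[k]:
--         row = digits.copy()
--         for p in combo:
--             row[p] = "*"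
--         result.append(row)
--     return result
-- ===== Notes on version B (the rewrite author's own statement) =====
-- stated objective: alternative
-- what changed: Replaces A's level-by-level recursion (which re-branches on every chosen position and stamps '*' on the way back up) by an iterative dynamic program: a single backward pass over the positions builds, for every size j, the lexicographically ordered list of j-element position combinations, and a final pass stamps each combination onto a fresh copy of the digit list.
import Mathlib
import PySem

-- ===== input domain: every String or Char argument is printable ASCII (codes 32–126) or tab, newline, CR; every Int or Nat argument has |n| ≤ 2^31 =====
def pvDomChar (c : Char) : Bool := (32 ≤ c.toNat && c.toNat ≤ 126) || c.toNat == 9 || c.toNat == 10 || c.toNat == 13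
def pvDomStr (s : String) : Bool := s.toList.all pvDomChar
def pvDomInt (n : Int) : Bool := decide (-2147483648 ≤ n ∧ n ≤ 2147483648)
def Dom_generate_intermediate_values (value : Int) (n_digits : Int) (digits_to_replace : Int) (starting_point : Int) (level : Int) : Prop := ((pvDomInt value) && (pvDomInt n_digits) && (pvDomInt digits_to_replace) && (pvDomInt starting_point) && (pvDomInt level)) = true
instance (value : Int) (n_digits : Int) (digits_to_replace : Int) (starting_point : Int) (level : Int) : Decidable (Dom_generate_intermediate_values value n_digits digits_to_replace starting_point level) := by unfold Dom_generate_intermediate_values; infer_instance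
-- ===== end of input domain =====

-- B replaces A's recursion by an iterative dynamic program over the positions (alternative
-- decomposition, same cost); equivalence is proved on Pre_, where the Python A returns normally.

-- ===== PORT A =====

-- list(str(value)) : the decimal digits (and sign) as one-character strings
def pvDigits (value : Int) : List String :=
  (PySem.Int.toStr value).toList.map (fun c => String.mk [c])

-- poss[i] = "*"  (Python wraps a negative i; IndexError = out of range, excluded by Pre_)
def pvStar (poss : List String) (i : Int) : List String :=
  PySem.List.pySetD poss i "*"

def generate_intermediate_values (value : Int) (n_digits : Int) (digits_to_replace : Int) (starting_point : Int) (level : Int) : List (List String) :=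
  if level = digits_to_replace then [pvDigits value]
  else if digits_to_replace < level then []   -- totality guard: here Python never returns (unbounded recursion); outside Pre_
  else
    (PySem.List.pyRange starting_point (n_digits - digits_to_replace + level + 1) 1).foldl
      (fun possibilities i =>
        let aux_possibilities :=
          (generate_intermediate_values value n_digits digits_to_replace (i + 1) (level + 1)).map
            (fun poss => pvStar poss i)
        possibilities ++ aux_possibilities) []
termination_by (digits_to_replace - level).toNat
decreasing_by
  rename_i h1 h2
  omega

-- ===== PORT B =====

-- one step of the DP: table after processing position p, from the table for positions > p
-- (Python: table = [table[0]] + [[[p]+c for c in prev] + cur for prev, cur in zip(table, table[1:])])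
def pvStep (p : Int) (table : List (List (List Int))) : List (List (List Int)) :=
  match table with
  | [] => []   -- unreachable: table is always nonempty
  | t0 :: rest => t0 :: (table.zip rest).map (fun pc => pc.1.map (fun c => p :: c) ++ pc.2)

-- row = digits.copy(); for p in combo: row[p] = "*"
def pvStamp (digits : List String) (combo : List Int) : List String :=
  combo.foldl (fun row p => pvStar row p) digits

def generate_intermediate_values_alt (value : Int) (n_digits : Int) (digits_to_replace : Int) (starting_point : Int) (level : Int) : List (List String) :=
  let k := digits_to_replace - level
  let digits := pvDigits value
  if k = 0 then [digits]
  else if n_digits - starting_point < k then []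
  else
    let table0 : List (List (List Int)) :=
      [[([] : List Int)]] ++ (PySem.List.pyRange 0 k 1).map (fun _ => [])
    let table :=
      (PySem.List.pyRange (n_digits - 1) (starting_point - 1) (-1)).foldl
        (fun table p => pvStep p table) table0
    (PySem.List.pyGetD table k []).foldl
      (fun result combo => result ++ [pvStamp digits combo]) []

-- ===== PRECONDITION & SPEC =====
-- Pre_ = exactly the inputs on which the Python A returns normally: either the base case,
-- or an empty top-level range (A returns [] at once; with a non-empty range and
-- level > digits_to_replace A recurses forever), or enough digits so that every stamped
-- position is a valid index into list(str(value)) (otherwise A raises IndexError).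
def Pre_generate_intermediate_values (value : Int) (n_digits : Int) (digits_to_replace : Int) (starting_point : Int) (level : Int) : Prop :=
  level = digits_to_replace ∨
    n_digits - starting_point < digits_to_replace - level ∨
    (level < digits_to_replace ∧
     -(((PySem.Int.toStr value).length : Int)) ≤ starting_point ∧
     n_digits ≤ ((PySem.Int.toStr value).length : Int))
instance (value : Int) (n_digits : Int) (digits_to_replace : Int) (starting_point : Int) (level : Int) : Decidable (Pre_generate_intermediate_values value n_digits digits_to_replace starting_point level) := by unfold Pre_generate_intermediate_values; infer_instance

def pvWitness_generate_intermediate_values : Int × Int × Int × Int × Int := (347, 3, 2, 0, 0)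

def Spec_generate_intermediate_values (value : Int) (n_digits : Int) (digits_to_replace : Int) (starting_point : Int) (level : Int) (out : List (List String)) : Prop := out = generate_intermediate_values_alt value n_digits digits_to_replace starting_point level
instance (value : Int) (n_digits : Int) (digits_to_replace : Int) (starting_point : Int) (level : Int) (out : List (List String)) : Decidable (Spec_generate_intermediate_values value n_digits digits_to_replace starting_point level out) := by unfold Spec_generate_intermediate_values; infer_instance

-- ===== CLAIM (what is proved, stated in full; the proofs are below) =====
def Claim_equal_generate_intermediate_values : Prop := ∀ (value : Int) (n_digits : Int) (digits_to_replace : Int) (starting_point : Int) (level : Int), Dom_generate_intermediate_values value n_digits digits_to_replace starting_point level → Pre_generate_intermediate_values value n_digits digits_to_replace starting_point level → Spec_generate_intermediate_values value n_digits digits_to_replace starting_point level (generate_intermediate_values value n_digits digits_to_replace starting_point level)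

-- ===== LEMMAS AND PROOFS =====

-- the common mathematical object: all sorted k-element lists of positions from [sp, nd), lex order
def pvCombos (sp nd : Int) : Nat → List (List Int)
  | 0 => [[]]
  | Nat.succ k =>
      (PySem.List.pyRange sp (nd - (k + 1) + 1) 1).flatMap
        (fun i => (pvCombos (i + 1) nd k).map (fun c => i :: c))

theorem pvWitness_ok :
    Dom_generate_intermediate_values pvWitness_generate_intermediate_values.1 pvWitness_generate_intermediate_values.2.1 pvWitness_generate_intermediate_values.2.2.1 pvWitness_generate_intermediate_values.2.2.2.1 pvWitness_generate_intermediate_values.2.2.2.2 ∧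
    Pre_generate_intermediate_values pvWitness_generate_intermediate_values.1 pvWitness_generate_intermediate_values.2.1 pvWitness_generate_intermediate_values.2.2.1 pvWitness_generate_intermediate_values.2.2.2.1 pvWitness_generate_intermediate_values.2.2.2.2 := by
  decide

-- pvStar basics ------------------------------------------------------------

theorem pvStar_some {xs : List String} {i : Int} {k : Nat}
    (h : PySem.List.pyIdx? xs.length i = some k) : pvStar xs i = xs.set k "*" := by
  unfold pvStar PySem.List.pySetD PySem.List.pySet?
  rw [h]; rfl

theorem pvStar_none {xs : List String} {i : Int}
    (h : PySem.List.pyIdx? xs.length i = none) : pvStar xs i = xs := by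
  unfold pvStar PySem.List.pySetD PySem.List.pySet?
  rw [h]; rfl

theorem pvStar_comm (xs : List String) (a b : Int) :
    pvStar (pvStar xs a) b = pvStar (pvStar xs b) a := by
  cases ha : PySem.List.pyIdx? xs.length a with
  | none =>
      cases hb : PySem.List.pyIdx? xs.length b with
      | none => rw [pvStar_none ha, pvStar_none hb, pvStar_none ha]
      | some kb =>
          rw [pvStar_none ha, pvStar_some hb,
              pvStar_none (show PySem.List.pyIdx? (xs.set kb "*").length a = none by
                rw [List.length_set]; exact ha)]
  | some ka =>
      cases hb : PySem.List.pyIdx? xs.length b with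
      | none =>
          rw [pvStar_some ha, pvStar_none hb,
              pvStar_none (show PySem.List.pyIdx? (xs.set ka "*").length b = none by
                rw [List.length_set]; exact hb), pvStar_some ha]
      | some kb =>
          rw [pvStar_some ha, pvStar_some hb,
              pvStar_some (show PySem.List.pyIdx? (xs.set ka "*").length b = some kb by
                rw [List.length_set]; exact hb),
              pvStar_some (show PySem.List.pyIdx? (xs.set kb "*").length a = some ka by
                rw [List.length_set]; exact ha)]
          by_cases hk : ka = kb
          · subst hk; rfl
          · rw [List.set_comm _ _ hk]

theorem star_foldr (c : List Int) (xs : List String) (i : Int) :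
    pvStar (c.foldr (fun j acc => pvStar acc j) xs) i =
      c.foldr (fun j acc => pvStar acc j) (pvStar xs i) := by
  induction c with
  | nil => rfl
  | cons j c ih => simp only [List.foldr_cons, pvStar_comm, ih]

-- the two stamping orders agree
theorem stamp_comm (c : List Int) (xs : List String) :
    c.foldr (fun i acc => pvStar acc i) xs = pvStamp xs c := by
  induction c generalizing xs with
  | nil => rfl
  | cons i c ih =>
      simp only [List.foldr_cons, pvStamp, List.foldl_cons]
      rw [star_foldr, ih (pvStar xs i)]
      rfl

-- A computes: map the back-to-front stamping over pvCombos -----------------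

theorem genA_eq_combos (value nd dtr : Int) :
    ∀ (k : Nat) (sp level : Int), level ≤ dtr → (dtr - level).toNat = k →
      generate_intermediate_values value nd dtr sp level =
        (pvCombos sp nd k).map (fun c => c.foldr (fun i acc => pvStar acc i) (pvDigits value)) := by
  intro k
  induction k with
  | zero =>
      intro sp level h1 h2
      have : level = dtr := by omega
      rw [generate_intermediate_values, if_pos this]
      rfl
  | succ k ih =>
      intro sp level h1 h2
      have hlt : level < dtr := by omega
      rw [generate_intermediate_values, if_neg (by omega), if_neg (by omega)]
      rw [PySem.List.foldl_append_eq_flatMap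
        (fun i => (generate_intermediate_values value nd dtr (i + 1) (level + 1)).map
          (fun poss => pvStar poss i))]
      simp only [List.nil_append]
      have hb : nd - dtr + level + 1 = nd - (↑k + 1) + 1 := by omega
      rw [hb]
      show _ = ((PySem.List.pyRange sp (nd - (↑k + 1) + 1) 1).flatMap
        (fun i => (pvCombos (i + 1) nd k).map (fun c => i :: c))).map _
      rw [List.map_flatMap]
      apply List.flatMap_congr  -- may need adjusting
      intro i _
      rw [ih (i + 1) (level + 1) (by omega) (by omega), List.map_map, List.map_map]
      rfl

-- pvCombos in/out decomposition at the first position ----------------------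

theorem combos_rec (p nd : Int) (k : Nat) (hp : p < nd) :
    pvCombos p nd (k + 1) =
      (pvCombos (p + 1) nd k).map (fun c => p :: c) ++ pvCombos (p + 1) nd (k + 1) := by
  by_cases h : p < nd - (↑k + 1) + 1
  · show (PySem.List.pyRange p (nd - (↑k + 1) + 1) 1).flatMap _ = _
    rw [PySem.List.pyRange_one_cons h, List.flatMap_cons]
    rfl
  · rw [not_lt] at h
    have e1 : pvCombos p nd (k + 1) = [] := by
      show (PySem.List.pyRange p (nd - (↑k + 1) + 1) 1).flatMap _ = []
      rw [PySem.List.pyRange_one_eq_nil h]; rfl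
    have e3 : pvCombos (p + 1) nd (k + 1) = [] := by
      show (PySem.List.pyRange (p + 1) (nd - (↑k + 1) + 1) 1).flatMap _ = []
      rw [PySem.List.pyRange_one_eq_nil (by omega)]; rfl
    have e2 : pvCombos (p + 1) nd k = [] := by
      cases k with
      | zero => omega
      | succ m =>
          show (PySem.List.pyRange (p + 1) (nd - (↑m + 1) + 1) 1).flatMap _ = []
          rw [PySem.List.pyRange_one_eq_nil (by push_cast at h ⊢; omega)]; rfl
    rw [e1, e2, e3]; rfl

-- B's DP step produces the combos tables for p from those for p+1 ----------

theorem pvStep_combos (nd p : Int) (k : Nat) (hp : p < nd) :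
    pvStep p ((List.range (k + 1)).map (fun j => pvCombos (p + 1) nd j)) =
      (List.range (k + 1)).map (fun j => pvCombos p nd j) := by
  have hsplit : ∀ (q : Int), (List.range (k + 1)).map (fun j => pvCombos q nd j) =
      pvCombos q nd 0 :: (List.range k).map (fun j => pvCombos q nd (j + 1)) := by
    intro q
    rw [List.range_succ_eq_map, List.map_cons, List.map_map]
    rfl
  rw [hsplit (p + 1), hsplit p]
  show pvCombos (p + 1) nd 0 ::
      ((pvCombos (p + 1) nd 0 :: (List.range k).map (fun j => pvCombos (p + 1) nd (j + 1))).zip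
        ((List.range k).map (fun j => pvCombos (p + 1) nd (j + 1)))).map
        (fun pc => pc.1.map (fun c => p :: c) ++ pc.2) = _
  congr 1
  apply List.ext_getElem
  · simp
  · intro j hj1 hj2
    simp only [List.getElem_map, List.getElem_zip, List.getElem_range]
    have hlen : j < k := by simpa using hj2
    have hcons : ∀ (m : Nat) (hm : m < k + 1),
        (pvCombos (p + 1) nd 0 :: (List.range k).map (fun i => pvCombos (p + 1) nd (i + 1)))[m]'(by simpa using hm)
          = pvCombos (p + 1) nd m := by
      intro m hm
      cases m with
      | zero => rfl
      | succ m => simp [List.getElem_map, List.getElem_range]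
    rw [hcons j (by omega)]
    exact (combos_rec p nd j hp).symm

-- the backward loop turns the table for nd into the table for sp -----------

theorem foldl_step (nd : Int) (k : Nat) :
    ∀ (m : Nat) (a sp : Int), sp ≤ a → a ≤ nd → (a - sp).toNat = m →
      (PySem.List.pyRange (a - 1) (sp - 1) (-1)).foldl (fun t q => pvStep q t)
          ((List.range (k + 1)).map (fun j => pvCombos a nd j)) =
        (List.range (k + 1)).map (fun j => pvCombos sp nd j) := by
  intro m
  induction m with
  | zero =>
      intro a sp h1 h2 h3
      have : a = sp := by omega
      subst this
      rw [PySem.List.pyRange_neg_one_eq_nil (by omega)]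
      rfl
  | succ m ih =>
      intro a sp h1 h2 h3
      rw [PySem.List.pyRange_neg_one_cons (by omega), List.foldl_cons]
      have hstep := pvStep_combos nd (a - 1) k (by omega)
      rw [show a - 1 + 1 = a by omega] at hstep
      rw [hstep]
      exact ih (a - 1) sp (by omega) (by omega) (by omega)

-- initial table = combos table at nd ---------------------------------------

theorem combos_self_nil (nd : Int) (j : Nat) : pvCombos nd nd (j + 1) = [] := by
  show (PySem.List.pyRange nd (nd - (↑j + 1) + 1) 1).flatMap _ = []
  rw [PySem.List.pyRange_one_eq_nil (by omega)]
  rfl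

theorem table0_eq (nd : Int) (kI : Int) (k : Nat) (hk : kI = (k : Int)) :
    ([[([] : List Int)]] ++ (PySem.List.pyRange 0 kI 1).map (fun _ => ([] : List (List Int)))) =
      (List.range (k + 1)).map (fun j => pvCombos nd nd j) := by
  subst hk
  apply List.ext_getElem
  · simp [PySem.List.length_pyRange_one]
  · intro j h1 h2
    simp only [List.singleton_append]
    cases j with
    | zero => simp only [List.getElem_cons_zero, List.getElem_map, List.getElem_range]; rfl
    | succ j =>
        simp only [List.getElem_cons_succ, List.getElem_map, List.getElem_range,
          combos_self_nil]

theorem combos_nil (sp nd : Int) (j : Nat) (h : nd - (↑j + 1) + 1 ≤ sp) :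
    pvCombos sp nd (j + 1) = [] := by
  show (PySem.List.pyRange sp (nd - (↑j + 1) + 1) 1).flatMap _ = []
  rw [PySem.List.pyRange_one_eq_nil h]
  rfl

theorem getD_map_range_combos (sp nd : Int) (k : Nat) :
    ((List.range (k + 1)).map (fun j => pvCombos sp nd j)).getD k [] = pvCombos sp nd k := by
  have hk : k < k + 1 := by omega
  rw [List.getD_eq_getElem?_getD, List.getElem?_map, List.getElem?_range hk]
  rfl

-- B computes: map the forward stamping over pvCombos
theorem genB_eq_combos (value nd dtr sp level : Int) (h : level < dtr) :
    generate_intermediate_values_alt value nd dtr sp level =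
      (pvCombos sp nd (dtr - level).toNat).map (fun c => pvStamp (pvDigits value) c) := by
  obtain ⟨j, hj⟩ : ∃ j, (dtr - level).toNat = j + 1 := ⟨(dtr - level).toNat - 1, by omega⟩
  rw [hj]
  unfold generate_intermediate_values_alt
  rw [if_neg (show ¬ (dtr - level = 0) by omega)]
  by_cases hfew : nd - sp < dtr - level
  · rw [if_pos hfew, combos_nil sp nd j (by omega)]
    rfl
  · rw [if_neg hfew]
    rw [table0_eq nd (dtr - level) (j + 1) (by omega)]
    rw [show dtr - level = ((j + 1 : Nat) : Int) by omega]
    simp only [PySem.List.pyGetD_natCast]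
    rw [foldl_step nd (j + 1) (nd - sp).toNat nd sp (by omega) le_rfl rfl]
    rw [getD_map_range_combos,
        PySem.List.foldl_append_singleton_eq_map, List.nil_append]

-- ===== VERDICT (by name: the statement is the Claim_ definition above) =====
theorem generate_intermediate_values_spec : Claim_equal_generate_intermediate_values := by
  intro value nd dtr sp level _ hpre
  unfold Spec_generate_intermediate_values
  by_cases h0 : level = dtr
  · rw [generate_intermediate_values, if_pos h0]
    unfold generate_intermediate_values_alt
    rw [if_pos (show dtr - level = 0 by omega)]
  · by_cases hlt : level < dtr
    · rw [genA_eq_combos value nd dtr (dtr - level).toNat sp level (le_of_lt hlt) rfl,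
          genB_eq_combos value nd dtr sp level hlt]
      exact List.map_congr_left (fun c _ => stamp_comm c (pvDigits value))
    · have hfew : nd - sp < dtr - level := by
        rcases hpre with h | h | h
        · exact absurd h h0
        · exact h
        · exact absurd h.1 hlt
      rw [generate_intermediate_values, if_neg h0, if_pos (by omega)]
      unfold generate_intermediate_values_alt
      rw [if_neg (show ¬ (dtr - level = 0) by omega), if_pos hfew]
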